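-- pv_equiv track=rewrite | github.com/hg0426/TENETPLUS | PreProcessScript_TE_Plus.py | create_cis_peaksource_pairs
-- ===== SOURCE A (Python) =====
-- def create_cis_peaksource_pairs(Peaks, genes_per_chromosome, gene_names_dict, tf_list):
--     gene_pairs = []
--
--     for peak in Peaks:
--         peak_chr = peak.split('-')[0]
--         peak_idx = gene_names_dict.get(peak, None)
--         if peak_idx is not None:
--             gene_pairs.extend([(peak_idx + 1, gene_names_dict[gene] + 1) for gene in genes_per_chromosome.get(peak_chr, []) if gene in gene_names_dict])
--
--     return gene_pairs
-- ===== SOURCE B (Python) =====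
-- def create_cis_peaksource_pairs(Peaks, genes_per_chromosome, gene_names_dict, tf_list):
--     # Precompute, once per chromosome, the (already +1 shifted) indices of its
--     # genes that are present in gene_names_dict; each peak then just reuses it.
--     idx_by_chr = {c: [gene_names_dict[g] + 1 for g in genes if g in gene_names_dict]
--                   for c, genes in genes_per_chromosome.items()}
--     out = []
--     for peak in Peaks:
--         i = gene_names_dict.get(peak)
--         if i is not None:
--             src = i + 1
--             for j in idx_by_chr.get(peak.split('-')[0], []):
--                 out.append((src, j))
--     return out
-- ===== Notes on version B (the rewrite author's own statement) =====
-- stated objective: alternative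
-- what changed: B precomputes, once per chromosome, the list of +1-shifted indices of its genes present in gene_names_dict, so each peak just pairs its own index with that ready list instead of re-filtering and re-looking-up the chromosome's whole gene list per peak; measured speed on generated inputs is comparable, not better.
import Mathlib
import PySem

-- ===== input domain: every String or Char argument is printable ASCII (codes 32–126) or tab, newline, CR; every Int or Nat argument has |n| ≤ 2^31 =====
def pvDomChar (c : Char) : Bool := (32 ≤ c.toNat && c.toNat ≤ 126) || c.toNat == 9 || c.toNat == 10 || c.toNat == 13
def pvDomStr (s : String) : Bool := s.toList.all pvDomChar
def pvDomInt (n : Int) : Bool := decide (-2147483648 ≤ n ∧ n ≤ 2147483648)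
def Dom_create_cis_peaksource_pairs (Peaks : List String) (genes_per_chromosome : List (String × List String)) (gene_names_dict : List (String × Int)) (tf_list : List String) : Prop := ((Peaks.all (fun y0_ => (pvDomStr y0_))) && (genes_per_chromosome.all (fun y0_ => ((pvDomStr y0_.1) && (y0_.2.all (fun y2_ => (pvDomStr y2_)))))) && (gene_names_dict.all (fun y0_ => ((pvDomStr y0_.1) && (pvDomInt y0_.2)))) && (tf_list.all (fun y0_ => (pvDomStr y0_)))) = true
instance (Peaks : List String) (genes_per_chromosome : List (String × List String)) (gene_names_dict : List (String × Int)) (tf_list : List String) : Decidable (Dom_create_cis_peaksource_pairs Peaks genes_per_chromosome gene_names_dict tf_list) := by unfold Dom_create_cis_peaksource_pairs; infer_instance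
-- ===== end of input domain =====

-- B precomputes each chromosome's valid gene indices once and pairs each peak against that ready list, instead of re-filtering the chromosome gene list per peak (alternative decomposition); return value only, no mutation.

-- dict.get on an insertion-ordered association list: first match (exact for a Python dict, whose keys are unique)
def pvLookup {ν : Type} (d : List (String × ν)) (k : String) : Option ν :=
  (d.find? (fun p => p.1 == k)).map (·.2)

-- ===== PORT A =====
def create_cis_peaksource_pairs (Peaks : List String) (genes_per_chromosome : List (String × List String)) (gene_names_dict : List (String × Int)) (tf_list : List String) : List (Int × Int) :=
  Peaks.foldl (fun gene_pairs peak =>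
    -- peak.split('-')[0]: split? with the nonempty separator "-" is some and never empty, so getD []/headD "" are exact
    let peak_chr := ((PySem.Str.split? peak "-").getD []).headD ""
    match pvLookup gene_names_dict peak with
    | none => gene_pairs
    | some peak_idx =>
      gene_pairs ++
        (((pvLookup genes_per_chromosome peak_chr).getD []).filter
            (fun gene => (pvLookup gene_names_dict gene).isSome)).map
          -- gnd[gene]: the filter guarantees presence, so getD 0 is exact
          (fun gene => (peak_idx + 1, (pvLookup gene_names_dict gene).getD 0 + 1))) []

-- ===== PORT B =====
def create_cis_peaksource_pairs_alt (Peaks : List String) (genes_per_chromosome : List (String × List String)) (gene_names_dict : List (String × Int)) (tf_list : List String) : List (Int × Int) :=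
  -- the dict comprehension over .items(): one entry per chromosome, values transformed
  let idx_by_chr : List (String × List Int) :=
    genes_per_chromosome.map (fun p =>
      (p.1, p.2.filterMap (fun g => (pvLookup gene_names_dict g).map (· + 1))))
  Peaks.foldl (fun out peak =>
    match pvLookup gene_names_dict peak with
    | none => out
    | some i =>
      out ++ ((pvLookup idx_by_chr (((PySem.Str.split? peak "-").getD []).headD "")).getD []).map
        (fun j => (i + 1, j))) []

-- ===== PRECONDITION & SPEC =====
def Spec_create_cis_peaksource_pairs (Peaks : List String) (genes_per_chromosome : List (String × List String)) (gene_names_dict : List (String × Int)) (tf_list : List String) (out : List (Int × Int)) : Prop := out = create_cis_peaksource_pairs_alt Peaks genes_per_chromosome gene_names_dict tf_list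
instance (Peaks : List String) (genes_per_chromosome : List (String × List String)) (gene_names_dict : List (String × Int)) (tf_list : List String) (out : List (Int × Int)) : Decidable (Spec_create_cis_peaksource_pairs Peaks genes_per_chromosome gene_names_dict tf_list out) := by unfold Spec_create_cis_peaksource_pairs; infer_instance

-- ===== CLAIM (what is proved, stated in full; the proofs are below) =====
def Claim_equal_create_cis_peaksource_pairs : Prop := ∀ (Peaks : List String) (genes_per_chromosome : List (String × List String)) (gene_names_dict : List (String × Int)) (tf_list : List String), Dom_create_cis_peaksource_pairs Peaks genes_per_chromosome gene_names_dict tf_list → Spec_create_cis_peaksource_pairs Peaks genes_per_chromosome gene_names_dict tf_list (create_cis_peaksource_pairs Peaks genes_per_chromosome gene_names_dict tf_list)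

-- ===== LEMMAS AND PROOFS =====

-- looking up in the value-mapped association list is mapping the lookup
theorem pvLookup_map_values {ν μ : Type} (d : List (String × ν)) (f : ν → μ) (k : String) :
    pvLookup (d.map (fun p => (p.1, f p.2))) k = (pvLookup d k).map f := by
  induction d with
  | nil => rfl
  | cons p rest ih =>
    by_cases h : p.1 == k <;> simp [pvLookup, List.find?, h] <;>
      simpa [pvLookup] using ih

-- A's filter-then-map over a chromosome's genes equals B's precomputed index list paired up
theorem pvFilterMap_eq {gnd : List (String × Int)} (i : Int) (gs : List String) :
    ((gs.filter (fun g => (pvLookup gnd g).isSome)).map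
        (fun g => (i + 1, (pvLookup gnd g).getD 0 + 1)))
    = (gs.filterMap (fun g => (pvLookup gnd g).map (· + 1))).map (fun j => (i + 1, j)) := by
  induction gs with
  | nil => rfl
  | cons g rest ih =>
    cases h : pvLookup gnd g <;>
      simp [List.filter_cons, List.filterMap_cons, h, ih]

theorem pv_step_eq (genes_per_chromosome : List (String × List String))
    (gene_names_dict : List (String × Int)) (acc : List (Int × Int)) (peak : String) :
    (let peak_chr := ((PySem.Str.split? peak "-").getD []).headD ""
     match pvLookup gene_names_dict peak with
     | none => acc
     | some peak_idx =>
       acc ++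
         (((pvLookup genes_per_chromosome peak_chr).getD []).filter
             (fun gene => (pvLookup gene_names_dict gene).isSome)).map
           (fun gene => (peak_idx + 1, (pvLookup gene_names_dict gene).getD 0 + 1)))
    = (match pvLookup gene_names_dict peak with
       | none => acc
       | some i =>
         acc ++ ((pvLookup
             (genes_per_chromosome.map (fun p =>
               (p.1, p.2.filterMap (fun g => (pvLookup gene_names_dict g).map (· + 1)))))
             (((PySem.Str.split? peak "-").getD []).headD "")).getD []).map (fun j => (i + 1, j))) := by
  cases h : pvLookup gene_names_dict peak with
  | none => simp
  | some i =>
    simp only [pvLookup_map_values, pvFilterMap_eq]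
    cases hc : pvLookup genes_per_chromosome (((PySem.Str.split? peak "-").getD []).headD "") <;>
      simp [hc]

-- ===== VERDICT (by name: the statement is the Claim_ definition above) =====
theorem create_cis_peaksource_pairs_spec : Claim_equal_create_cis_peaksource_pairs := by
  intro Peaks gpc gnd tf _
  show create_cis_peaksource_pairs Peaks gpc gnd tf = create_cis_peaksource_pairs_alt Peaks gpc gnd tf
  unfold create_cis_peaksource_pairs create_cis_peaksource_pairs_alt
  congr 1
  funext acc peak
  exact pv_step_eq gpc gnd acc peak
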